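-- pv_equiv track=rewrite | github.com/RunMoony/algorithms-python | 프로그래머스/전화번호목록.py | solution
-- ===== SOURCE A (Python) =====
-- def solution(phone_book):
--     answer = []
--     for i in range(len(phone_book)):
--         for j in range(len(phone_book)):
--             if i == j:
--                 continue
--             if phone_book[i] in phone_book[j]:
--                 answer.append(1)
--             else:
--                 answer.append(0)
--     if 1 in answer:
--         return False
--     if not 1 in answer:
--         return True
-- ===== SOURCE B (Python) =====
-- def solution(phone_book):
--     # Index every substring of every entry once; an entry is contained in another
--     # entry iff it occurs as a substring of at least 2 entries (it occurs in itself).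
--     count = {}
--     for t in phone_book:
--         subs = {t[a:b] for a in range(len(t) + 1) for b in range(a, len(t) + 1)}
--         for u in subs:
--             count[u] = count.get(u, 0) + 1
--     return all(count.get(s, 0) < 2 for s in phone_book)
-- ===== Notes on version B (the rewrite author's own statement) =====
-- stated objective: faster
-- what changed: Replaces the all-pairs O(n^2) substring scan by building a hash index counting, for each substring, in how many entries it occurs; an entry is contained in another iff its count is >= 2 (it occurs in itself).
import Mathlib
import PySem

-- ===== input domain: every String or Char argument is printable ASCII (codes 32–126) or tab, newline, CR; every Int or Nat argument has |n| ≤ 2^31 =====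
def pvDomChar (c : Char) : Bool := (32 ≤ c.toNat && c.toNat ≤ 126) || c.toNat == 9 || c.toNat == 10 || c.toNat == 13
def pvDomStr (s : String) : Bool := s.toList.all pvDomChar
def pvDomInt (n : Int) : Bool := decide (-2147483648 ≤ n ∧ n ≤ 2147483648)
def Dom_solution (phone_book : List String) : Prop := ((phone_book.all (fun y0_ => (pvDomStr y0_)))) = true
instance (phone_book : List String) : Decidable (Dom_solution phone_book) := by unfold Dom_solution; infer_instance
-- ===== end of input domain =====

-- B replaces A's all-pairs substring scan by a substring index (per substring, the count of entries containing it).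

-- ===== PORT A =====
def solution (phone_book : List String) : Bool :=
  let n : Int := phone_book.length
  let answer : List Int :=
    (PySem.List.pyRange 0 n 1).foldl (fun acc i =>
      (PySem.List.pyRange 0 n 1).foldl (fun acc j =>
        if i == j then acc
        else if PySem.Str.isIn (PySem.List.pyGetD phone_book i "") (PySem.List.pyGetD phone_book j "") then
          acc ++ [1]
        else
          acc ++ [0]) acc) []
  if (1 : Int) ∈ answer then false
  else if (1 : Int) ∉ answer then true
  else true  -- unreachable: Python falls off (returns None) only if both tests fail, which cannot happen

-- ===== PORT B =====
-- subs = {t[a:b] for a in range(len(t)+1) for b in range(a, len(t)+1)}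
def pvSubsOf (t : String) : PySem.Set String :=
  PySem.Set.ofList
    ((PySem.List.pyRange 0 ((PySem.Str.len t : Int) + 1) 1).flatMap (fun a =>
      (PySem.List.pyRange a ((PySem.Str.len t : Int) + 1) 1).map (fun b =>
        PySem.Str.slice t (some a) (some b))))

def solution_alt (phone_book : List String) : Bool :=
  let count : PySem.Dict String Int :=
    phone_book.foldl (fun d t =>
      (pvSubsOf t).foldl (fun d u => d.insert u (d.getD u 0 + 1)) d) PySem.Dict.empty
  phone_book.all (fun s => decide (count.getD s 0 < 2))

-- ===== PRECONDITION & SPEC =====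
def Spec_solution (phone_book : List String) (out : Bool) : Prop := out = solution_alt phone_book
instance (phone_book : List String) (out : Bool) : Decidable (Spec_solution phone_book out) := by unfold Spec_solution; infer_instance

-- ===== CLAIM (what is proved, stated in full; the proofs are below) =====
def Claim_equal_solution : Prop := ∀ (phone_book : List String), Dom_solution phone_book → Spec_solution phone_book (solution phone_book)

-- ===== LEMMAS AND PROOFS =====

-- the shared mathematical content: some entry is a substring of a different-index entry
def pvBad (pb : List String) : Prop :=
  ∃ (i j : Nat) (hi : i < pb.length) (hj : j < pb.length), i ≠ j ∧ pb[i].toList <:+: pb[j].toList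

theorem two_le_countP_iff {α : Type} (p : α → Bool) (l : List α) :
    2 ≤ l.countP p ↔ ∃ (i j : Nat) (hi : i < l.length) (hj : j < l.length), i ≠ j ∧ p l[i] ∧ p l[j] := by
  induction l with
  | nil => simp
  | cons x l ih =>
    rw [List.countP_cons]
    constructor
    · intro h
      by_cases hx : p x
      · have h1 : 0 < l.countP p ∨ 2 ≤ l.countP p := by rw [if_pos hx] at h; omega
        rcases h1 with h1 | h1
        · obtain ⟨a, ha, hpa⟩ := List.countP_pos_iff.mp h1
          obtain ⟨k, hk, rfl⟩ := List.mem_iff_getElem.mp ha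
          exact ⟨0, k+1, by simp, by simp; omega, by omega, by simpa using hx, by simpa using hpa⟩
        · obtain ⟨i, j, hi, hj, hne, hpi, hpj⟩ := ih.mp h1
          exact ⟨i+1, j+1, by simp; omega, by simp; omega, by omega, by simpa using hpi,
            by simpa using hpj⟩
      · have h1 : 2 ≤ l.countP p := by rw [if_neg hx] at h; omega
        obtain ⟨i, j, hi, hj, hne, hpi, hpj⟩ := ih.mp h1
        exact ⟨i+1, j+1, by simp; omega, by simp; omega, by omega, by simpa using hpi,
          by simpa using hpj⟩
    · rintro ⟨i, j, hi, hj, hne, hpi, hpj⟩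
      have key : ∀ (k : Nat) (hk : k < (x :: l).length), p ((x :: l)[k]) → k ≠ 0 → 0 < l.countP p := by
        intro k hk hp hk0
        obtain ⟨k', rfl⟩ : ∃ k', k = k' + 1 := ⟨k - 1, by omega⟩
        have hk' : k' < l.length := by simpa using hk
        exact List.countP_pos_iff.mpr ⟨l[k'], l.getElem_mem hk', by simpa using hp⟩
      rcases Nat.eq_zero_or_pos i with h0 | h0
      · subst h0
        have hx : p x := by simpa using hpi
        have := key j hj hpj (by omega)
        rw [if_pos hx]; omega
      · rcases Nat.eq_zero_or_pos j with h0' | h0'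
        · subst h0'
          have hx : p x := by simpa using hpj
          have := key i hi hpi (by omega)
          rw [if_pos hx]; omega
        · obtain ⟨i', rfl⟩ : ∃ i', i = i' + 1 := ⟨i - 1, by omega⟩
          obtain ⟨j', rfl⟩ : ∃ j', j = j' + 1 := ⟨j - 1, by omega⟩
          have : 2 ≤ l.countP p := ih.mpr ⟨i', j', by simpa using hi, by simpa using hj, by omega,
            by simpa using hpi, by simpa using hpj⟩
          omega

theorem mem_pvSubsOf (s t : String) : s ∈ pvSubsOf t ↔ s.toList <:+: t.toList := by
  unfold pvSubsOf
  simp only [PySem.Set.mem_ofList, List.mem_flatMap, List.mem_map, PySem.List.mem_pyRange_one]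
  constructor
  · rintro ⟨a, ⟨ha0, _⟩, b, ⟨hab, _⟩, rfl⟩
    rw [PySem.Str.toList_slice, PySem.Chars.slice_eq_listSlice,
      PySem.List.slice_toNat (ha := ha0) (hb := by omega)]
    exact ((t.toList.drop a.toNat).take_prefix _).isInfix.trans (t.toList.drop_suffix a.toNat).isInfix
  · intro h
    obtain ⟨u, v, huv⟩ := h
    have hlen := congrArg List.length huv
    simp at hlen
    refine ⟨(u.length : Int), ⟨by omega, by simp [PySem.Str.len_eq]; omega⟩,
      (u.length : Int) + (s.toList.length : Int), ⟨by omega, by simp [PySem.Str.len_eq]; omega⟩, ?_⟩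
    rw [← String.toList_inj, PySem.Str.toList_slice, PySem.Chars.slice_eq_listSlice]
    rw [show ((u.length : Int) + (s.toList.length : Int)) = ((u.length + s.toList.length : Nat) : Int) by push_cast; ring]
    rw [PySem.List.slice_natCast, ← huv]
    simp

-- pvBad in terms of occurrence counts: an entry is bad iff it occurs as substring of ≥ 2 entries
theorem pvBad_iff_count (pb : List String) :
    pvBad pb ↔ ∃ s ∈ pb, 2 ≤ pb.countP (fun t => decide (s.toList <:+: t.toList)) := by
  constructor
  · rintro ⟨i, j, hi, hj, hne, hinf⟩
    refine ⟨pb[i], List.getElem_mem hi, (two_le_countP_iff _ _).mpr ⟨i, j, hi, hj, hne, ?_, ?_⟩⟩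
    · simp
    · simpa using hinf
  · rintro ⟨s, hs, h2⟩
    obtain ⟨k, hk, rfl⟩ := List.mem_iff_getElem.mp hs
    obtain ⟨i, j, hi, hj, hne, hpi, hpj⟩ := (two_le_countP_iff _ _).mp h2
    by_cases hki : k = i
    · exact ⟨k, j, hk, hj, by omega, by simpa using hpj⟩
    · exact ⟨k, i, hk, hi, hki, by simpa using hpi⟩

theorem pvA_iff (pb : List String) : solution pb = true ↔ ¬ pvBad pb := by
  unfold solution
  dsimp only
  have hinner : ∀ (i : Int) (acc : List Int),
      (PySem.List.pyRange 0 (pb.length : Int) 1).foldl (fun acc j =>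
        if i == j then acc
        else if PySem.Str.isIn (PySem.List.pyGetD pb i "") (PySem.List.pyGetD pb j "") then acc ++ [1]
        else acc ++ [0]) acc
      = acc ++ (PySem.List.pyRange 0 (pb.length : Int) 1).flatMap (fun j =>
          if i = j then []
          else if PySem.Str.isIn (PySem.List.pyGetD pb i "") (PySem.List.pyGetD pb j "") then [1] else [0]) := by
    intro i acc
    rw [← PySem.List.foldl_append_eq_flatMap]
    apply PySem.List.foldl_congr_mem
    intro acc j _
    by_cases h : i = j
    · simp [h]
    · simp only [beq_iff_eq, if_neg h]
      split_ifs <;> rfl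
  have houter :
      (PySem.List.pyRange 0 (pb.length : Int) 1).foldl (fun acc i =>
        (PySem.List.pyRange 0 (pb.length : Int) 1).foldl (fun acc j =>
          if i == j then acc
          else if PySem.Str.isIn (PySem.List.pyGetD pb i "") (PySem.List.pyGetD pb j "") then acc ++ [1]
          else acc ++ [0]) acc) []
      = ([] : List Int) ++ (PySem.List.pyRange 0 (pb.length : Int) 1).flatMap (fun i =>
          (PySem.List.pyRange 0 (pb.length : Int) 1).flatMap (fun j =>
            if i = j then []
            else if PySem.Str.isIn (PySem.List.pyGetD pb i "") (PySem.List.pyGetD pb j "") then [1] else [0])) := by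
    rw [← PySem.List.foldl_append_eq_flatMap]
    apply PySem.List.foldl_congr_mem
    intro acc i _
    exact hinner i acc
  rw [houter]
  have helem : ∀ i j : Int,
      ((1 : Int) ∈ (if i = j then ([] : List Int)
        else if PySem.Str.isIn (PySem.List.pyGetD pb i "") (PySem.List.pyGetD pb j "") then [1] else [0]))
      ↔ (i ≠ j ∧ PySem.Str.isIn (PySem.List.pyGetD pb i "") (PySem.List.pyGetD pb j "") = true) := by
    intro i j
    split_ifs with h1 h2 <;> simp_all
  have hmem : ((1 : Int) ∈ ([] : List Int) ++ (PySem.List.pyRange 0 (pb.length : Int) 1).flatMap (fun i =>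
      (PySem.List.pyRange 0 (pb.length : Int) 1).flatMap (fun j =>
        if i = j then []
        else if PySem.Str.isIn (PySem.List.pyGetD pb i "") (PySem.List.pyGetD pb j "") then [1] else [0])))
      ↔ pvBad pb := by
    simp only [List.nil_append, List.mem_flatMap, PySem.List.mem_pyRange_one, helem]
    constructor
    · rintro ⟨i, ⟨hi0, hin⟩, j, ⟨hj0, hjn⟩, hne, hIn⟩
      rw [PySem.List.pyGetD_eq_getElem _ _ hi0 hin, PySem.List.pyGetD_eq_getElem _ _ hj0 hjn] at hIn
      rw [PySem.Str.isIn_iff_infix] at hIn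
      exact ⟨i.toNat, j.toNat, by omega, by omega, by omega, hIn⟩
    · rintro ⟨i, j, hi, hj, hne, hinf⟩
      refine ⟨(i : Int), ⟨by omega, by omega⟩, (j : Int), ⟨by omega, by omega⟩, by omega, ?_⟩
      rw [PySem.List.pyGetD_eq_getElem _ _ (by omega) (by omega),
        PySem.List.pyGetD_eq_getElem _ _ (by omega) (by omega), PySem.Str.isIn_iff_infix]
      simpa using hinf
  by_cases hb : pvBad pb
  · rw [if_pos (hmem.mpr hb)]
    simp [hb]
  · rw [if_neg (fun h => hb (hmem.mp h))]
    rw [if_pos (fun h => hb (hmem.mp h))]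
    simp [hb]

theorem pvCount_getD (pb : List String) (d : PySem.Dict String Int) (s : String) :
    (pb.foldl (fun d t => (pvSubsOf t).foldl (fun d u => d.insert u (d.getD u 0 + 1)) d) d).getD s 0
      = d.getD s 0 + (pb.countP (fun t => decide (s ∈ pvSubsOf t)) : Int) := by
  induction pb generalizing d with
  | nil => simp
  | cons t pb ih =>
    rw [List.foldl_cons, ih, List.countP_cons, PySem.Dict.getD_foldl_insert_add_one]
    have hnd : (pvSubsOf t).Nodup := PySem.Set.nodup_ofList _
    by_cases hm : s ∈ pvSubsOf t
    · rw [List.count_eq_one_of_mem hnd hm, if_pos (by simpa using hm)]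
      push_cast; ring
    · rw [List.count_eq_zero_of_not_mem hm, if_neg (by simpa using hm)]
      push_cast; ring

theorem pvB_iff (pb : List String) : solution_alt pb = true ↔ ¬ pvBad pb := by
  unfold solution_alt
  rw [List.all_eq_true]
  have hcount : ∀ s : String,
      ((pb.foldl (fun d t => (pvSubsOf t).foldl (fun d u => d.insert u (d.getD u 0 + 1)) d)
        PySem.Dict.empty).getD s 0)
      = (pb.countP (fun t => decide (s.toList <:+: t.toList)) : Int) := by
    intro s
    rw [pvCount_getD]
    have : pb.countP (fun t => decide (s ∈ pvSubsOf t))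
        = pb.countP (fun t => decide (s.toList <:+: t.toList)) :=
      List.countP_congr (fun t _ => by simp [mem_pvSubsOf])
    simp [this]
  rw [pvBad_iff_count]
  push Not
  constructor
  · intro h s hs
    have := h s hs
    rw [hcount s] at this
    simp at this
    omega
  · intro h s hs
    have := h s hs
    rw [hcount s]
    simp
    omega

-- ===== VERDICT (by name: the statement is the Claim_ definition above) =====
theorem solution_spec : Claim_equal_solution := by
  intro pb _
  unfold Spec_solution
  rw [Bool.eq_iff_iff, pvA_iff, pvB_iff]
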